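-- pv_equiv track=rewrite | github.com/iuliagroza/Uni-Stuff-Babes-Bolyai-University | Sem I/Fundamentals of Programming/Laboratories/a2-913-Groza-IuliaDiana/src/program.py | module_sequence
-- ===== SOURCE A (Python) =====
-- def get_numbers_list(numbers_list):
--     return numbers_list
--
-- def module_sequence(numbers_list):
--     sol_len = -1  # The starting index of the sequence
--     sol_start = -1  # The length of the sequence
--
--     for i in range(len(numbers_list)):
--         real_sum = numbers_list[i][0]
--         imaginary_sum = numbers_list[i][1]
--
--         j = i + 1
--         while j < len(numbers_list) and (real_sum != 10 and imaginary_sum != 10):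
--             real_sum += numbers_list[j][0]
--             imaginary_sum += numbers_list[j][1]
--             j += 1
--         j -= 1
--
--         if real_sum == 10 and imaginary_sum == 10 and j - i + 1 > sol_len:  # We found a solution
--             sol_len = j - i + 1
--             sol_start = i
--
--     if sol_len == -1:  # If there is no solution
--         return []
--     else:
--         return get_numbers_list(numbers_list[sol_start:sol_start + sol_len])
-- ===== SOURCE B (Python) =====
-- def module_sequence(numbers_list):
--     # O(n): prefix sums + one right-to-left pass with two hash maps giving, for
--     # each start i, the first prefix index whose partial sum hits 10 (real) /
--     # 10 (imag); a candidate exists exactly when those two indices coincide.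
--     n = len(numbers_list)
--     prefix = [(0, 0)]
--     for r, im in numbers_list:
--         pr, pi = prefix[-1]
--         prefix.append((pr + r, pi + im))
--     stop = [None] * n
--     first_re = {}  # prefix real value -> smallest index k (among those seen, i.e. k > i)
--     first_im = {}
--     for i in reversed(range(n)):
--         k = i + 1
--         first_re[prefix[k][0]] = k
--         first_im[prefix[k][1]] = k
--         kr = first_re.get(prefix[i][0] + 10)
--         ki = first_im.get(prefix[i][1] + 10)
--         if kr is not None and kr == ki:
--             stop[i] = kr
--     best_len = -1
--     best_start = -1
--     for i in range(n):
--         if stop[i] is not None and stop[i] - i > best_len: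
--             best_len = stop[i] - i
--             best_start = i
--     if best_len == -1:
--         return []
--     return numbers_list[best_start:best_start + best_len]
-- ===== Notes on version B (the rewrite author's own statement) =====
-- stated objective: faster
-- what changed: A restarts an accumulating scan at every start index (O(n^2)); B computes prefix sums once and a single right-to-left pass with two hash maps finds, for each start, the first later prefix index matching the real/imaginary target (a candidate exists iff the two indices coincide), then one linear selection pass.
import Mathlib
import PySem

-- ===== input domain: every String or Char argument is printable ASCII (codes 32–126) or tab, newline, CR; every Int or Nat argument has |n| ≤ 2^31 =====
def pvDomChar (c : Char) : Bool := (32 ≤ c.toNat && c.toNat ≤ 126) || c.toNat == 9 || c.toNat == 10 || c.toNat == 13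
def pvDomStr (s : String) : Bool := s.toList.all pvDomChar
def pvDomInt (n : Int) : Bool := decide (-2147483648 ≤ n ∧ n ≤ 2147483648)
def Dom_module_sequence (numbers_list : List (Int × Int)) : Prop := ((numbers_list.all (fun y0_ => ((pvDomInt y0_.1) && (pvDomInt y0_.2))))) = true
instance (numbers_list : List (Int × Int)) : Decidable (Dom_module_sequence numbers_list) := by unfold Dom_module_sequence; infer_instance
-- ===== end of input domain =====

-- B replaces A's restart-per-start quadratic scan by prefix sums plus one right-to-left pass
-- with two hash maps (first later index whose prefix sum matches each target), then one selection pass.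


-- ===== PORT A =====
-- Python helper get_numbers_list (identity)
def get_numbers_list (numbers_list : List (Int × Int)) : List (Int × Int) := numbers_list

-- the inner `while` loop of A: state (real_sum, imaginary_sum, j)
def msInner (nl : List (Int × Int)) (rs ims : Int) (j : Nat) : Int × Int × Nat :=
  if h : j < nl.length ∧ rs ≠ 10 ∧ ims ≠ 10 then
    msInner nl (rs + (nl.getD j (0, 0)).1) (ims + (nl.getD j (0, 0)).2) (j + 1)
  else (rs, ims, j)
termination_by nl.length - j
decreasing_by omega

-- one iteration of A's outer `for i in range(len(...))` loop; state (sol_len, sol_start)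
def aStep (nl : List (Int × Int)) (s : Int × Int) (i : Nat) : Int × Int :=
  let x := nl.getD i (0, 0)
  let r := msInner nl x.1 x.2 (i + 1)
  let j := r.2.2 - 1          -- `j -= 1` (here j ≥ i + 1 ≥ 1, so Nat subtraction is exact)
  if r.1 = 10 ∧ r.2.1 = 10 ∧ (j : Int) - (i : Int) + 1 > s.1 then
    ((j : Int) - (i : Int) + 1, (i : Int))
  else s

def module_sequence (numbers_list : List (Int × Int)) : List (Int × Int) :=
  let st := (List.range numbers_list.length).foldl (aStep numbers_list) (-1, -1)
  if st.1 = -1 then []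
  else get_numbers_list (PySem.List.slice numbers_list (some st.2) (some (st.2 + st.1)))

-- ===== PORT B =====
-- building the prefix-sum list; state (prefix, pr, pi)
def bPrefixStep (s : List (Int × Int) × Int × Int) (x : Int × Int) : List (Int × Int) × Int × Int :=
  (s.1 ++ [(s.2.1 + x.1, s.2.2 + x.2)], s.2.1 + x.1, s.2.2 + x.2)

-- one iteration of the right-to-left pass; state (first_re, first_im, stop)
def bScanStep (pre : List (Int × Int))
    (s : PySem.Dict Int Nat × PySem.Dict Int Nat × List (Option Nat)) (i : Nat) :
    PySem.Dict Int Nat × PySem.Dict Int Nat × List (Option Nat) :=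
  let k := i + 1
  let fr := s.1.insert (pre.getD k (0, 0)).1 k
  let fi := s.2.1.insert (pre.getD k (0, 0)).2 k
  let kr := fr.get? ((pre.getD i (0, 0)).1 + 10)
  let ki := fi.get? ((pre.getD i (0, 0)).2 + 10)
  (fr, fi, if kr ≠ none ∧ kr = ki then s.2.2.set i kr else s.2.2)

-- one iteration of the selection loop; state (best_len, best_start)
def bPickStep (stop : List (Option Nat)) (s : Int × Int) (i : Nat) : Int × Int :=
  match stop.getD i none with
  | some k => if (k : Int) - (i : Int) > s.1 then ((k : Int) - (i : Int), (i : Int)) else s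
  | none => s

def module_sequence_alt (numbers_list : List (Int × Int)) : List (Int × Int) :=
  let n := numbers_list.length
  let pre := (numbers_list.foldl bPrefixStep ([(0, 0)], 0, 0)).1
  let stop := (((List.range n).reverse).foldl (bScanStep pre)
      (PySem.Dict.empty, PySem.Dict.empty, List.replicate n none)).2.2
  let st := (List.range n).foldl (bPickStep stop) (-1, -1)
  if st.1 = -1 then []
  else PySem.List.slice numbers_list (some st.2) (some (st.2 + st.1))

-- ===== PRECONDITION & SPEC =====
def Spec_module_sequence (numbers_list : List (Int × Int)) (out : List (Int × Int)) : Prop := out = module_sequence_alt numbers_list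
instance (numbers_list : List (Int × Int)) (out : List (Int × Int)) : Decidable (Spec_module_sequence numbers_list out) := by unfold Spec_module_sequence; infer_instance

-- ===== CLAIM (what is proved, stated in full; the proofs are below) =====
def Claim_equal_module_sequence : Prop := ∀ (numbers_list : List (Int × Int)), Dom_module_sequence numbers_list → Spec_module_sequence numbers_list (module_sequence numbers_list)

-- ===== LEMMAS AND PROOFS =====

-- prefix sums of nl, as a function of the index
def preAt (nl : List (Int × Int)) (k : Nat) : Int × Int :=
  (((nl.take k).map Prod.fst).sum, ((nl.take k).map Prod.snd).sum)

def reHit (nl : List (Int × Int)) (i k : Nat) : Bool := (preAt nl k).1 == (preAt nl i).1 + 10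
def imHit (nl : List (Int × Int)) (i k : Nat) : Bool := (preAt nl k).2 == (preAt nl i).2 + 10

-- first k in (i, n] whose prefix sum matches the real / imaginary target of start i
def krOf (nl : List (Int × Int)) (i : Nat) : Option Nat :=
  (List.range' (i + 1) (nl.length - i)).find? (reHit nl i)
def kiOf (nl : List (Int × Int)) (i : Nat) : Option Nat :=
  (List.range' (i + 1) (nl.length - i)).find? (imHit nl i)
def stopSpec (nl : List (Int × Int)) (i : Nat) : Option Nat :=
  if krOf nl i ≠ none ∧ krOf nl i = kiOf nl i then krOf nl i else none

-- where A's inner loop stops when entered at index j: the first hit in [j, n), else n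
def stopFrom (nl : List (Int × Int)) (i j : Nat) : Nat :=
  match (List.range' j (nl.length - j)).find? (fun k => reHit nl i k || imHit nl i k) with
  | some k => k
  | none => nl.length

-- running partial sums (proof-side description of the list bPrefixStep builds)
def psums (c : Int × Int) : List (Int × Int) → List (Int × Int)
  | [] => []
  | x :: t => (c.1 + x.1, c.2 + x.2) :: psums (c.1 + x.1, c.2 + x.2) t

lemma find?_range'_some {p : Nat → Bool} : ∀ {len s k : Nat},
    (List.range' s len).find? p = some k ↔
      (s ≤ k ∧ k < s + len ∧ p k = true ∧ ∀ j, s ≤ j → j < k → p j = false) := by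
  intro len
  induction len with
  | zero => intro s k; simp; omega
  | succ n ih =>
    intro s k
    rw [List.range'_succ]
    by_cases hp : p s
    · rw [List.find?_cons_of_pos hp]
      constructor
      · rintro h
        have : s = k := by simpa using h
        subst this
        exact ⟨le_refl _, by omega, hp, fun j h1 h2 => absurd h2 (by omega)⟩
      · rintro ⟨h1, h2, h3, h4⟩
        by_cases hne : s = k
        · simp [hne]
        · have := h4 s (le_refl _) (by omega)
          simp [hp] at this
    · rw [List.find?_cons_of_neg (by simp [hp]), ih]
      constructor
      · rintro ⟨h1, h2, h3, h4⟩
        refine ⟨by omega, by omega, h3, fun j hj1 hj2 => ?_⟩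
        rcases Nat.eq_or_lt_of_le hj1 with rfl | h
        · simpa using hp
        · exact h4 j h hj2
      · rintro ⟨h1, h2, h3, h4⟩
        have hks : k ≠ s := by rintro rfl; simp [h3] at hp
        exact ⟨by omega, by omega, h3, fun j hj1 hj2 => h4 j (by omega) hj2⟩

lemma find?_range'_none {p : Nat → Bool} : ∀ {len s : Nat},
    (List.range' s len).find? p = none ↔ ∀ j, s ≤ j → j < s + len → p j = false := by
  intro len s
  rw [List.find?_eq_none]
  constructor
  · intro h j h1 h2
    simpa using h j (by simp [List.mem_range'_1]; omega)
  · intro h x hx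
    simp [List.mem_range'_1] at hx
    simp [h x hx.1 (by omega)]

lemma preAt_succ (nl : List (Int × Int)) (k : Nat) (h : k < nl.length) :
    preAt nl (k + 1) = ((preAt nl k).1 + (nl.getD k (0, 0)).1, (preAt nl k).2 + (nl.getD k (0, 0)).2) := by
  unfold preAt
  have h1 : ((nl.map Prod.fst).take (k+1)) = (nl.map Prod.fst).take k ++ [nl[k].1] := by
    rw [List.take_add_one, List.getElem?_eq_getElem (by simpa using h)]; simp
  have h2 : ((nl.map Prod.snd).take (k+1)) = (nl.map Prod.snd).take k ++ [nl[k].2] := by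
    rw [List.take_add_one, List.getElem?_eq_getElem (by simpa using h)]; simp
  simp only [List.map_take] at h1 h2 ⊢
  rw [h1, h2]
  simp [List.getD_eq_getElem?_getD, List.getElem?_eq_getElem h]

lemma stopFrom_bounds (nl : List (Int × Int)) (i j : Nat) (hj : j ≤ nl.length) :
    j ≤ stopFrom nl i j ∧ stopFrom nl i j ≤ nl.length := by
  unfold stopFrom
  rcases hf : (List.range' j (nl.length - j)).find? (fun k => reHit nl i k || imHit nl i k) with _ | k
  · simp [hj]
  · have hm := List.mem_range'_1.mp (List.mem_of_find?_eq_some hf)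
    simp only
    omega

lemma msInner_spec (nl : List (Int × Int)) (i : Nat) : ∀ j, i < j → j ≤ nl.length →
    msInner nl ((preAt nl j).1 - (preAt nl i).1) ((preAt nl j).2 - (preAt nl i).2) j =
      ((preAt nl (stopFrom nl i j)).1 - (preAt nl i).1,
       (preAt nl (stopFrom nl i j)).2 - (preAt nl i).2, stopFrom nl i j) := by
  intro j
  induction hfuel : nl.length - j using Nat.strong_induction_on generalizing j with
  | _ fuel ih =>
  intro hij hjn
  rw [msInner]
  by_cases hjlt : j < nl.length
  · have hrange : List.range' j (nl.length - j) = j :: List.range' (j+1) (nl.length - (j+1)) := by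
      have : nl.length - j = (nl.length - (j+1)) + 1 := by omega
      rw [this, List.range'_succ]
    by_cases hhit : (reHit nl i j || imHit nl i j)
    · -- the loop stops right here: one of the sums already hit its target
      have hcond : ¬ (j < nl.length ∧ (preAt nl j).1 - (preAt nl i).1 ≠ 10 ∧ (preAt nl j).2 - (preAt nl i).2 ≠ 10) := by
        simp only [reHit, imHit, Bool.or_eq_true, beq_iff_eq] at hhit
        rintro ⟨-, h1, h2⟩
        rcases hhit with h | h
        · exact h1 (by omega)
        · exact h2 (by omega)
      rw [dif_neg hcond]
      have hsf : stopFrom nl i j = j := by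
        unfold stopFrom
        rw [hrange, List.find?_cons_of_pos (p := fun k => reHit nl i k || imHit nl i k) hhit]
      rw [hsf]
    · -- no hit at j: one more iteration
      simp only [Bool.or_eq_true, not_or, reHit, imHit, beq_iff_eq] at hhit
      have hcond : (j < nl.length ∧ (preAt nl j).1 - (preAt nl i).1 ≠ 10 ∧ (preAt nl j).2 - (preAt nl i).2 ≠ 10) := by
        refine ⟨hjlt, ?_, ?_⟩ <;> omega
      rw [dif_pos hcond]
      have hstep := preAt_succ nl j hjlt
      have hsf : stopFrom nl i j = stopFrom nl i (j+1) := by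
        unfold stopFrom
        rw [hrange, List.find?_cons_of_neg (p := fun k => reHit nl i k || imHit nl i k)
          (by simp only [reHit, imHit, Bool.or_eq_true, beq_iff_eq, not_or]; exact hhit)]
      have e1 : (preAt nl j).1 - (preAt nl i).1 + (nl.getD j (0,0)).1 = (preAt nl (j+1)).1 - (preAt nl i).1 := by
        rw [hstep]; ring
      have e2 : (preAt nl j).2 - (preAt nl i).2 + (nl.getD j (0,0)).2 = (preAt nl (j+1)).2 - (preAt nl i).2 := by
        rw [hstep]; ring
      rw [e1, e2, hsf]
      exact ih (nl.length - (j+1)) (by omega) (j+1) rfl (by omega) (by omega)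
  · -- j = nl.length: the loop does not run
    have hj : j = nl.length := by omega
    rw [dif_neg (by rintro ⟨h, -⟩; omega)]
    have hsf : stopFrom nl i j = j := by
      unfold stopFrom
      rw [hj]
      simp
    rw [hsf]

lemma pfold_eq : ∀ (l : List (Int × Int)) (acc : List (Int × Int)) (c : Int × Int),
    l.foldl bPrefixStep (acc, c) =
      (acc ++ psums c l, c.1 + (l.map Prod.fst).sum, c.2 + (l.map Prod.snd).sum) := by
  intro l
  induction l with
  | nil => intro acc c; simp [psums]
  | cons x t ih =>
    intro acc c
    simp only [List.foldl_cons, bPrefixStep]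
    rw [ih]
    simp only [psums, List.append_assoc, List.singleton_append, List.map_cons, List.sum_cons,
      Prod.mk.injEq]
    refine ⟨trivial, by ring, by ring⟩

lemma psums_getD : ∀ (l : List (Int × Int)) (c : Int × Int) (k : Nat), k ≤ l.length →
    (c :: psums c l).getD k (0, 0) = (c.1 + (preAt l k).1, c.2 + (preAt l k).2) := by
  intro l
  induction l with
  | nil => intro c k hk; simp at hk; subst hk; simp [psums, preAt]
  | cons x t ih =>
    intro c k hk
    match k with
    | 0 => simp [preAt]
    | k + 1 =>
      simp only [psums, List.getD_cons_succ]
      rw [ih _ k (by simpa using hk)]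
      simp only [preAt, List.take_succ_cons, List.map_cons, List.sum_cons, Prod.mk.injEq]
      exact ⟨by ring, by ring⟩

-- invariant of the right-to-left pass once the indices [m, n) have been processed
def BInv (nl : List (Int × Int)) (m : Nat)
    (s : PySem.Dict Int Nat × PySem.Dict Int Nat × List (Option Nat)) : Prop :=
  (∀ v, s.1.get? v = (List.range' (m + 1) (nl.length - m)).find? (fun k => (preAt nl k).1 == v)) ∧
  (∀ v, s.2.1.get? v = (List.range' (m + 1) (nl.length - m)).find? (fun k => (preAt nl k).2 == v)) ∧
  s.2.2.length = nl.length ∧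
  (∀ i, i < m → s.2.2.getD i none = none) ∧
  (∀ i, m ≤ i → i < nl.length → s.2.2.getD i none = stopSpec nl i)

lemma bScanStep_inv (nl pre : List (Int × Int))
    (hpre : ∀ k, k ≤ nl.length → pre.getD k (0, 0) = preAt nl k)
    (m : Nat) (hm : m < nl.length) (s : PySem.Dict Int Nat × PySem.Dict Int Nat × List (Option Nat))
    (h : BInv nl (m + 1) s) : BInv nl m (bScanStep pre s m) := by
  obtain ⟨h1, h2, hlen, hlo, hhi⟩ := h
  have hk1 : pre.getD (m + 1) (0, 0) = preAt nl (m + 1) := hpre _ (by omega)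
  have hk0 : pre.getD m (0, 0) = preAt nl m := hpre _ (by omega)
  have hrange : List.range' (m + 1) (nl.length - m)
      = (m + 1) :: List.range' (m + 2) (nl.length - (m + 1)) := by
    have : nl.length - m = (nl.length - (m + 1)) + 1 := by omega
    rw [this, List.range'_succ]
  have hd1 : ∀ v, (s.1.insert (pre.getD (m+1) (0, 0)).1 (m+1)).get? v
      = (List.range' (m + 1) (nl.length - m)).find? (fun k => (preAt nl k).1 == v) := by
    intro v
    rw [hrange, hk1]
    by_cases hv : (preAt nl (m+1)).1 = v
    · rw [hv, PySem.Dict.get?_insert_self,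
        List.find?_cons_of_pos (p := fun k => (preAt nl k).1 == v) (by simp [hv])]
    · rw [PySem.Dict.get?_insert_of_ne _ _ (by omega),
        List.find?_cons_of_neg (p := fun k => (preAt nl k).1 == v) (by simp [hv]), h1]
  have hd2 : ∀ v, (s.2.1.insert (pre.getD (m+1) (0, 0)).2 (m+1)).get? v
      = (List.range' (m + 1) (nl.length - m)).find? (fun k => (preAt nl k).2 == v) := by
    intro v
    rw [hrange, hk1]
    by_cases hv : (preAt nl (m+1)).2 = v
    · rw [hv, PySem.Dict.get?_insert_self,
        List.find?_cons_of_pos (p := fun k => (preAt nl k).2 == v) (by simp [hv])]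
    · rw [PySem.Dict.get?_insert_of_ne _ _ (by omega),
        List.find?_cons_of_neg (p := fun k => (preAt nl k).2 == v) (by simp [hv]), h2]
  have hkr : (s.1.insert (pre.getD (m+1) (0, 0)).1 (m+1)).get? ((pre.getD m (0, 0)).1 + 10) = krOf nl m := by
    rw [hd1, hk0]; rfl
  have hki : (s.2.1.insert (pre.getD (m+1) (0, 0)).2 (m+1)).get? ((pre.getD m (0, 0)).2 + 10) = kiOf nl m := by
    rw [hd2, hk0]; rfl
  refine ⟨hd1, hd2, ?_, ?_, ?_⟩
  · simp only [bScanStep]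
    split <;> simp [hlen]
  · intro i hi
    simp only [bScanStep, hkr, hki]
    split
    · rw [List.getD_eq_getElem?_getD, List.getElem?_set_ne (by omega), ← List.getD_eq_getElem?_getD]
      exact hlo i (by omega)
    · exact hlo i (by omega)
  · intro i hi1 hi2
    simp only [bScanStep, hkr, hki]
    rcases Nat.eq_or_lt_of_le hi1 with rfl | hlt
    · -- the freshly written entry
      by_cases hc : krOf nl m ≠ none ∧ krOf nl m = kiOf nl m
      · rw [if_pos hc, List.getD_eq_getElem?_getD, List.getElem?_set_self (by omega)]
        simp [stopSpec, hc]
      · rw [if_neg hc]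
        rw [hlo m (by omega), stopSpec, if_neg hc]
    · -- untouched entries above m
      split
      · rw [List.getD_eq_getElem?_getD, List.getElem?_set_ne (by omega), ← List.getD_eq_getElem?_getD]
        exact hhi i (by omega) hi2
      · exact hhi i (by omega) hi2

lemma bfold_inv (nl pre : List (Int × Int))
    (hpre : ∀ k, k ≤ nl.length → pre.getD k (0, 0) = preAt nl k) :
    ∀ m, m ≤ nl.length → ∀ s, BInv nl m s →
      BInv nl 0 (((List.range m).reverse).foldl (bScanStep pre) s) := by
  intro m
  induction m with
  | zero => intro _ s hs; simpa using hs
  | succ n ih =>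
    intro hm s hs
    rw [List.range_succ, List.reverse_append]
    simp only [List.reverse_singleton, List.singleton_append, List.foldl_cons]
    exact ih (by omega) _ (bScanStep_inv nl pre hpre n (by omega) s hs)

lemma stopSpec_to_stopFrom (nl : List (Int × Int)) (i k : Nat) (hi : i < nl.length)
    (h : stopSpec nl i = some k) :
    stopFrom nl i (i + 1) = k ∧ (preAt nl k).1 = (preAt nl i).1 + 10 ∧
      (preAt nl k).2 = (preAt nl i).2 + 10 := by
  unfold stopSpec at h
  split at h
  · next hc =>
    obtain ⟨hne, heq⟩ := hc
    have hkr : krOf nl i = some k := h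
    have hki : kiOf nl i = some k := by rw [← heq]; exact h
    rw [krOf, find?_range'_some] at hkr
    rw [kiOf, find?_range'_some] at hki
    obtain ⟨hk1, hk2, hkre, hkrlt⟩ := hkr
    obtain ⟨-, -, hkim, hkimlt⟩ := hki
    simp only [reHit, beq_iff_eq] at hkre hkrlt
    simp only [imHit, beq_iff_eq] at hkim hkimlt
    refine ⟨?_, hkre, hkim⟩
    unfold stopFrom
    by_cases hkn : k < nl.length
    · have : (List.range' (i+1) (nl.length - (i+1))).find?
          (fun k => reHit nl i k || imHit nl i k) = some k := by
        rw [find?_range'_some]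
        refine ⟨hk1, by omega, by simp [reHit, hkre], fun j hj1 hj2 => ?_⟩
        have := hkrlt j hj1 hj2
        have := hkimlt j hj1 hj2
        simp only [reHit, imHit] at *
        simp_all
      rw [this]
    · have hkeq : k = nl.length := by omega
      have : (List.range' (i+1) (nl.length - (i+1))).find?
          (fun k => reHit nl i k || imHit nl i k) = none := by
        rw [find?_range'_none]
        intro j hj1 hj2
        have := hkrlt j hj1 (by omega)
        have := hkimlt j hj1 (by omega)
        simp only [reHit, imHit] at *
        simp_all
      rw [this, hkeq]
  · exact absurd h (by simp)

lemma stopFrom_to_stopSpec (nl : List (Int × Int)) (i : Nat) (hi : i < nl.length)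
    (h1 : (preAt nl (stopFrom nl i (i + 1))).1 = (preAt nl i).1 + 10)
    (h2 : (preAt nl (stopFrom nl i (i + 1))).2 = (preAt nl i).2 + 10) :
    stopSpec nl i = some (stopFrom nl i (i + 1)) := by
  set K := stopFrom nl i (i + 1) with hK
  have hmain : krOf nl i = some K ∧ kiOf nl i = some K := by
    unfold stopFrom at hK
    rcases hf : (List.range' (i+1) (nl.length - (i+1))).find?
        (fun k => reHit nl i k || imHit nl i k) with _ | k
    · -- no hit strictly below n; the loop would run to the end, K = n
      rw [hf] at hK
      rw [find?_range'_none] at hf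
      have hKn : K = nl.length := hK
      constructor
      · rw [krOf, find?_range'_some]
        refine ⟨by omega, by omega, by simp only [reHit, beq_iff_eq]; exact hKn ▸ h1,
          fun j hj1 hj2 => ?_⟩
        have := hf j hj1 (by omega)
        simp only [reHit, imHit, Bool.or_eq_false_iff] at this
        exact this.1
      · rw [kiOf, find?_range'_some]
        refine ⟨by omega, by omega, by simp only [imHit, beq_iff_eq]; exact hKn ▸ h2,
          fun j hj1 hj2 => ?_⟩
        have := hf j hj1 (by omega)
        simp only [reHit, imHit, Bool.or_eq_false_iff] at this
        exact this.2
    · rw [hf] at hK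
      have hKk : K = k := hK
      subst hKk
      rw [find?_range'_some] at hf
      obtain ⟨hf1, hf2, hfp, hflt⟩ := hf
      constructor
      · rw [krOf, find?_range'_some]
        refine ⟨hf1, by omega, by simp [reHit, h1], fun j hj1 hj2 => ?_⟩
        have := hflt j hj1 hj2
        simp only [reHit, imHit, Bool.or_eq_false_iff] at this
        exact this.1
      · rw [kiOf, find?_range'_some]
        refine ⟨hf1, by omega, by simp [imHit, h2], fun j hj1 hj2 => ?_⟩
        have := hflt j hj1 hj2
        simp only [reHit, imHit, Bool.or_eq_false_iff] at this
        exact this.2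
  rw [stopSpec, if_pos (by simp [hmain.1, hmain.2])]
  exact hmain.1

lemma step_eq (nl : List (Int × Int)) (stop : List (Option Nat))
    (hstop : ∀ i, i < nl.length → stop.getD i none = stopSpec nl i)
    (s : Int × Int) (i : Nat) (hi : i ∈ List.range nl.length) :
    aStep nl s i = bPickStep stop s i := by
  rw [List.mem_range] at hi
  have hx1 : (nl.getD i (0, 0)).1 = (preAt nl (i + 1)).1 - (preAt nl i).1 := by
    rw [preAt_succ nl i hi]; ring
  have hx2 : (nl.getD i (0, 0)).2 = (preAt nl (i + 1)).2 - (preAt nl i).2 := by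
    rw [preAt_succ nl i hi]; ring
  have hr := msInner_spec nl i (i + 1) (by omega) (by omega)
  have hKb := stopFrom_bounds nl i (i + 1) (by omega)
  have hcast : ((stopFrom nl i (i + 1) - 1 : Nat) : Int) - (i : Int) + 1
      = ((stopFrom nl i (i + 1) : Nat) : Int) - (i : Int) := by
    have : (1:Nat) ≤ stopFrom nl i (i + 1) := by omega
    rw [Nat.cast_sub this]; ring
  simp only [aStep, bPickStep, hx1, hx2, hr, hstop i hi, hcast]
  rcases hss : stopSpec nl i with _ | k
  · -- no candidate: A's success test must fail
    rw [if_neg]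
    rintro ⟨hc1, hc2, -⟩
    have hsf := stopFrom_to_stopSpec nl i hi (by omega) (by omega)
    rw [hss] at hsf
    exact absurd hsf (by simp)
  · obtain ⟨hKk, hre, him⟩ := stopSpec_to_stopFrom nl i k hi hss
    rw [hKk]
    have hcond1 : (preAt nl k).1 - (preAt nl i).1 = 10 := by omega
    have hcond2 : (preAt nl k).2 - (preAt nl i).2 = 10 := by omega
    by_cases hgt : ((k : Nat) : Int) - (i : Int) > s.1
    · rw [if_pos ⟨hcond1, hcond2, hgt⟩]; simp [hgt]
    · rw [if_neg (by rintro ⟨-, -, h⟩; exact hgt h)]; simp [hgt]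

-- ===== VERDICT (by name: the statement is the Claim_ definition above) =====
theorem module_sequence_spec : Claim_equal_module_sequence := by
  intro nl _
  unfold Spec_module_sequence module_sequence module_sequence_alt get_numbers_list
  have hpfold := pfold_eq nl [(0, 0)] (0, 0)
  have hpre : ∀ k, k ≤ nl.length →
      ((nl.foldl bPrefixStep ([(0, 0)], 0, 0)).1).getD k (0, 0) = preAt nl k := by
    intro k hk
    rw [show (([(0, 0)], 0, 0) : List (Int × Int) × Int × Int) = ([(0, 0)], ((0 : Int), (0 : Int))) from rfl,
      hpfold]
    show (((0, 0) : Int × Int) :: psums (0, 0) nl).getD k (0, 0) = preAt nl k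
    rw [psums_getD nl (0, 0) k hk]
    simp
  have hinv0 : BInv nl nl.length (PySem.Dict.empty, PySem.Dict.empty, List.replicate nl.length none) := by
    refine ⟨fun v => ?_, fun v => ?_, by simp, fun i _ => by simp, fun i h1 h2 => by omega⟩
    · simp [PySem.Dict.get?_empty]
    · simp [PySem.Dict.get?_empty]
  have hinv := bfold_inv nl _ hpre nl.length le_rfl _ hinv0
  have hstop : ∀ i, i < nl.length →
      ((((List.range nl.length).reverse).foldl (bScanStep (nl.foldl bPrefixStep ([(0, 0)], 0, 0)).1)
        (PySem.Dict.empty, PySem.Dict.empty, List.replicate nl.length none)).2.2).getD i none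
      = stopSpec nl i := fun i hi => hinv.2.2.2.2 i (Nat.zero_le i) hi
  have hfold : (List.range nl.length).foldl (aStep nl) (-1, -1)
      = (List.range nl.length).foldl (bPickStep
          ((((List.range nl.length).reverse).foldl
              (bScanStep (nl.foldl bPrefixStep ([(0, 0)], 0, 0)).1)
              (PySem.Dict.empty, PySem.Dict.empty, List.replicate nl.length none)).2.2)) (-1, -1) :=
    PySem.List.foldl_congr_mem _ _ _ _ (fun acc x hx => step_eq nl _ hstop acc x hx)
  simp only [hfold]
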